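-- pv_equiv track=rewrite | github.com/Yinghao-Li/seqlbtoolkit | seqlbtoolkit/tokenizations/sp.py | get_span_indices
-- ===== SOURCE A (Python) =====
-- from typing import List, Tuple, Optional
--
-- Span = Tuple[int, int]
--
-- def get_span_indices(tokens: List[str]) -> List[Span]:
--     """Calculate span indices for each token in a list of tokens."""
--     spans = []
--     start_index = 0
--     for token in tokens:
--         end_index = start_index + len(token)
--         spans.append((start_index, end_index))
--         start_index = end_index
--     return spans
-- ===== SOURCE B (Python) =====
-- from itertools import accumulate
-- from typing import List, Tuple
--
-- Span = Tuple[int, int]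
--
-- def get_span_indices(tokens: List[str]) -> List[Span]:
--     """Calculate span indices for each token via a prefix-sum table."""
--     ends = list(accumulate(len(t) for t in tokens))
--     starts = [0] + ends[:-1]
--     return list(zip(starts, ends))
-- ===== Notes on version B (the rewrite author's own statement) =====
-- stated objective: idiomatic
-- what changed: Replaces the single loop maintaining a running start index by a prefix-sum table of token lengths (itertools.accumulate) from which starts and ends are derived and zipped.
import Mathlib
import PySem

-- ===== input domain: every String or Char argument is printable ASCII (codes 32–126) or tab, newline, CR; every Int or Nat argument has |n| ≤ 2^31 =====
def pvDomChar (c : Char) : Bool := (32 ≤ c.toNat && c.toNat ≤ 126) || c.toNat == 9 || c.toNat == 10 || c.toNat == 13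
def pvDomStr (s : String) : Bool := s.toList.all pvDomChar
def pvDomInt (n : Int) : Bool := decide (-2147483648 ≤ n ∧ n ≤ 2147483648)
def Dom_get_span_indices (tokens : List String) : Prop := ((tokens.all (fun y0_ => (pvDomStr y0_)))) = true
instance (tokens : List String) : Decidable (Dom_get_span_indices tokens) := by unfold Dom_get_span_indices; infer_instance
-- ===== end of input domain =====

-- B replaces A's running-start loop by a prefix-sum table of lengths, zipped with its shifted self (idiomatic decomposition; same cost).
-- ===== PORT A =====
def get_span_indices (tokens : List String) : List (Int × Int) :=
  (tokens.foldl (fun (st : List (Int × Int) × Int) token =>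
      let end_index : Int := st.2 + (PySem.Str.len token)
      (st.1 ++ [(st.2, end_index)], end_index)) ([], 0)).1

-- ===== PORT B =====
def get_span_indices_alt (tokens : List String) : List (Int × Int) :=
  let ends : List Int :=
    ((tokens.map (fun t => (PySem.Str.len t : Int))).scanl (· + ·) 0).tail
  let starts : List Int := 0 :: ends.dropLast
  starts.zip ends

-- ===== PRECONDITION & SPEC =====
def Spec_get_span_indices (tokens : List String) (out : List (Int × Int)) : Prop := out = get_span_indices_alt tokens
instance (tokens : List String) (out : List (Int × Int)) : Decidable (Spec_get_span_indices tokens out) := by unfold Spec_get_span_indices; infer_instance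

-- ===== CLAIM (what is proved, stated in full; the proofs are below) =====
def Claim_equal_get_span_indices : Prop := ∀ (tokens : List String), Dom_get_span_indices tokens → Spec_get_span_indices tokens (get_span_indices tokens)

-- ===== LEMMAS AND PROOFS =====

-- ===== VERDICT (by name: the statement is the Claim_ definition above) =====
-- the intended result, starting at offset s
def pvSpans (s : Int) : List String → List (Int × Int)
  | [] => []
  | t :: ts => (s, s + (PySem.Str.len t : Int)) :: pvSpans (s + (PySem.Str.len t : Int)) ts

theorem pvA_loop (ts : List String) (acc : List (Int × Int)) (s : Int) :
    (ts.foldl (fun (st : List (Int × Int) × Int) token =>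
      let e : Int := st.2 + (PySem.Str.len token)
      (st.1 ++ [(st.2, e)], e)) (acc, s)).1 = acc ++ pvSpans s ts := by
  induction ts generalizing acc s with
  | nil => simp [pvSpans]
  | cons t ts ih =>
    rw [List.foldl_cons]
    exact (ih _ _).trans (by simp [pvSpans])

theorem pvB_zip (ts : List String) (s : Int) :
    (s :: (((ts.map (fun t => (PySem.Str.len t : Int))).scanl (· + ·) s).tail).dropLast).zip
      (((ts.map (fun t => (PySem.Str.len t : Int))).scanl (· + ·) s).tail) = pvSpans s ts := by
  induction ts generalizing s with
  | nil => simp [pvSpans]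
  | cons t ts ih =>
    cases ts with
    | nil => simp [pvSpans, List.scanl_cons, List.scanl_nil]
    | cons t' ts' =>
      have h := ih (s + (PySem.Str.len t : Int))
      simp only [List.map_cons, List.scanl_cons, List.tail_cons] at h ⊢
      rw [List.dropLast_cons_of_ne_nil
        (List.ne_nil_of_length_pos (by simp [List.length_scanl]))]
      simpa [pvSpans, List.zip_cons_cons] using h

theorem get_span_indices_spec : Claim_equal_get_span_indices := by
  intro tokens _
  unfold Spec_get_span_indices get_span_indices get_span_indices_alt
  rw [pvA_loop tokens [] 0, ← pvB_zip tokens 0]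
  simp
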